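-- pv_equiv track=rewrite | github.com/jiadong324/ProstateUtils | LR-Assembly/Bhap.py | process_node_path
-- ===== SOURCE A (Python) =====
-- def process_node_path(node_path):
--     nodes = []
--     node_char = [node_path[0]]
--
--     for i in range(1, len(node_path)):
--         if node_path[i] == '>' or node_path[i] == '<':
--             this_node = ''.join(node_char[1:])
--             nodes.append(this_node)
--             node_char = []
--
--         if i == len(node_path) - 1:
--             node_char.append(node_path[-1])
--             this_node = ''.join(node_char[1:])
--             nodes.append(this_node)
--         node_char.append(node_path[i])
--
--     return nodes
-- ===== SOURCE B (Python) =====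
-- import re
--
-- def process_node_path(node_path):
--     tail = node_path[1:]
--     return re.split('[<>]', tail) if tail else []
-- ===== Notes on version B (the rewrite author's own statement) =====
-- stated objective: idiomatic
-- what changed: B drops the leading orientation character and delegates the parsing to a single regex split on the angle-bracket separators, replacing A's per-character loop with a flush buffer and its special last-iteration handling.
import Mathlib
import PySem

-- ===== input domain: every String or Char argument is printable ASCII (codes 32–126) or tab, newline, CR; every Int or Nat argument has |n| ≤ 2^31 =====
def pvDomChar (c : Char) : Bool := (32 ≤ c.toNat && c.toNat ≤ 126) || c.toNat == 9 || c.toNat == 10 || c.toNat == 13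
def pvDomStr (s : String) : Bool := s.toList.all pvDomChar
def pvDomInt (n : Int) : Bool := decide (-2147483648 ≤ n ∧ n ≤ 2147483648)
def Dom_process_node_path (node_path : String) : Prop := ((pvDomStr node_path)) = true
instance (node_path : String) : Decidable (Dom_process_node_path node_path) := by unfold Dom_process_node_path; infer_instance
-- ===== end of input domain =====

-- B replaces A's per-character scan with flush buffer by slicing off the leading
-- orientation character and splitting the rest on '<'/'>' (re.split); idiomatic, same cost.


-- ===== PORT A =====
-- Loop body of A over the remaining characters (Python: for i in range(1, len(node_path))).
-- node_char is the Python list of one-char strings, kept as List Char; ''.join(node_char[1:])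
-- is String.ofList node_char.tail (exact, every element is one char).  The Python test
-- 'i == len(node_path) - 1' (last iteration) is 'tl = []' here, and there node_path[-1] = c.
def pvGoA (nodes : List String) (node_char : List Char) : List Char → List String
  | [] => nodes
  | c :: tl =>
    let st1 : List String × List Char :=
      if c = '>' ∨ c = '<' then (nodes ++ [String.ofList node_char.tail], []) else (nodes, node_char)
    let st2 : List String × List Char :=
      if tl = [] then
        let nc' := st1.2 ++ [c]
        (st1.1 ++ [String.ofList nc'.tail], nc')
      else st1
    pvGoA st2.1 (st2.2 ++ [c]) tl

def process_node_path (node_path : String) : List String :=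
  match node_path.toList with
  | [] => []          -- Python raises IndexError on node_path[0]; excluded by Pre_
  | c0 :: rest => pvGoA [] [c0] rest

-- ===== PORT B =====
-- re.split('[<>]', tail): split the character list at every '<' or '>' (exact for this pattern).
def pvSplitAngles : List Char → List (List Char)
  | [] => [[]]
  | c :: tl =>
    if c = '<' ∨ c = '>' then [] :: pvSplitAngles tl
    else
      match pvSplitAngles tl with
      | [] => [[c]]
      | h :: t => (c :: h) :: t

def process_node_path_alt (node_path : String) : List String :=
  let tail := node_path.toList.drop 1    -- node_path[1:]
  if tail = [] then [] else (pvSplitAngles tail).map String.ofList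

-- ===== PRECONDITION & SPEC =====
-- Pre_ excludes only the empty string, on which A raises IndexError (node_path[0]).
def Pre_process_node_path (node_path : String) : Prop := node_path.toList ≠ []
instance (node_path : String) : Decidable (Pre_process_node_path node_path) := by
  unfold Pre_process_node_path; infer_instance
def pvWitness_process_node_path : String := ">a<b"

def Spec_process_node_path (node_path : String) (out : List String) : Prop := out = process_node_path_alt node_path
instance (node_path : String) (out : List String) : Decidable (Spec_process_node_path node_path out) := by unfold Spec_process_node_path; infer_instance

-- ===== CLAIM (what is proved, stated in full; the proofs are below) =====
def Claim_equal_process_node_path : Prop := ∀ (node_path : String), Dom_process_node_path node_path → Pre_process_node_path node_path → Spec_process_node_path node_path (process_node_path node_path)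

-- ===== LEMMAS AND PROOFS =====

theorem pvSplitAngles_ne_nil (tl : List Char) : pvSplitAngles tl ≠ [] := by
  cases tl with
  | nil => simp [pvSplitAngles]
  | cons c tl =>
    simp only [pvSplitAngles]
    split
    · simp
    · cases h : pvSplitAngles tl <;> simp

-- prepend a buffer onto the first segment of a split
def pvPrep (buf : List Char) : List (List Char) → List (List Char)
  | [] => [buf]
  | h :: t => (buf ++ h) :: t

theorem pvSplitAngles_cons_nonsep (c : Char) (tl : List Char) (hc : ¬ (c = '<' ∨ c = '>'))
    (h0 : List Char) (t0 : List (List Char)) (h : pvSplitAngles tl = h0 :: t0) :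
    pvSplitAngles (c :: tl) = (c :: h0) :: t0 := by
  simp [pvSplitAngles, hc, h]

theorem pvPrep_nil (l : List (List Char)) (h : l ≠ []) : pvPrep [] l = l := by
  cases l with
  | nil => exact absurd rfl h
  | cons a t => simp [pvPrep]

theorem pvGoA_eq (tl : List Char) : ∀ (nodes : List String) (d : Char) (buf : List Char),
    tl ≠ [] → pvGoA nodes (d :: buf) tl = nodes ++ (pvPrep buf (pvSplitAngles tl)).map String.ofList := by
  induction tl with
  | nil => intro _ _ _ h; exact absurd rfl h
  | cons c tl ih =>
    intro nodes d buf _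
    cases tl with
    | nil =>
      by_cases hc : c = '>' ∨ c = '<'
      · have hc' : c = '<' ∨ c = '>' := hc.symm
        simp [pvGoA, pvSplitAngles, pvPrep, hc, hc']
      · have hc' : ¬ (c = '<' ∨ c = '>') := fun h => hc h.symm
        simp [pvGoA, pvSplitAngles, pvPrep, hc, hc']
    | cons c2 tl2 =>
      have hne : (c2 :: tl2) ≠ ([] : List Char) := by simp
      by_cases hc : c = '>' ∨ c = '<'
      · have hc' : c = '<' ∨ c = '>' := hc.symm
        rw [show pvGoA nodes (d :: buf) (c :: c2 :: tl2)
              = pvGoA (nodes ++ [String.ofList buf]) (c :: []) (c2 :: tl2) by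
            simp [pvGoA, hc]]
        rw [ih _ c [] hne]
        rw [pvPrep_nil _ (pvSplitAngles_ne_nil _)]
        simp [pvSplitAngles, hc', pvPrep]
      · have hc' : ¬ (c = '<' ∨ c = '>') := fun h => hc h.symm
        rw [show pvGoA nodes (d :: buf) (c :: c2 :: tl2)
              = pvGoA nodes (d :: (buf ++ [c])) (c2 :: tl2) by
            simp [pvGoA, hc]]
        rw [ih _ d (buf ++ [c]) hne]
        cases h : pvSplitAngles (c2 :: tl2) with
        | nil => exact absurd h (pvSplitAngles_ne_nil _)
        | cons h0 t0 =>
          rw [pvSplitAngles_cons_nonsep c _ hc' _ _ h]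
          simp [pvPrep]

-- ===== VERDICT (by name: the statement is the Claim_ definition above) =====
theorem process_node_path_spec : Claim_equal_process_node_path := by
  intro node_path _ hpre
  unfold Spec_process_node_path
  cases h : node_path.toList with
  | nil => exact absurd h hpre
  | cons c0 rest =>
    cases rest with
    | nil => simp [process_node_path, process_node_path_alt, h, pvGoA]
    | cons c1 tl =>
      simp only [process_node_path, process_node_path_alt, h, List.drop]
      rw [pvGoA_eq _ [] c0 [] (by simp)]
      rw [pvPrep_nil _ (pvSplitAngles_ne_nil _)]
      simp
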